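-- pv_equiv track=rewrite | github.com/arek-grows/Challenges | Challenges 81-100/Challenge84.py | to_underscore
-- ===== SOURCE A (Python) =====
-- from typing import Union
--
-- def to_underscore(name: Union[str, int]) -> str:
--     if type(name) is not str:
--         return str(name)
--     if len(name) < 2:
--         return str(name).lower()
--     snake_case = name[0].lower()
--     for x in name[1:]:
--         if x.isupper() or x.isdigit():
--             snake_case += "_" + x.lower()
--         else:
--             snake_case += x
--     return snake_case  # Put your code here!!!
-- ===== SOURCE B (Python) =====
-- from typing import Union
--
-- # Translation table built once: each uppercase letter / digit maps to "_" + its lowercase form.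
-- _TABLE = {ord(c): "_" + c.lower() for c in "ABCDEFGHIJKLMNOPQRSTUVWXYZ0123456789"}
--
-- def to_underscore(name: Union[str, int]) -> str:
--     if type(name) is not str:
--         return str(name)
--     return name[:1].lower() + name[1:].translate(_TABLE)
-- ===== Notes on version B (the rewrite author's own statement) =====
-- stated objective: faster
-- what changed: Replaced the per-character if/else string accumulation (repeated str +=) with a translation table built once (uppercase/digit -> '_'+lowercase) applied in one pass via str.translate, plus name[:1].lower(), which also subsumes A's separate len<2 branch.
import Mathlib
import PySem

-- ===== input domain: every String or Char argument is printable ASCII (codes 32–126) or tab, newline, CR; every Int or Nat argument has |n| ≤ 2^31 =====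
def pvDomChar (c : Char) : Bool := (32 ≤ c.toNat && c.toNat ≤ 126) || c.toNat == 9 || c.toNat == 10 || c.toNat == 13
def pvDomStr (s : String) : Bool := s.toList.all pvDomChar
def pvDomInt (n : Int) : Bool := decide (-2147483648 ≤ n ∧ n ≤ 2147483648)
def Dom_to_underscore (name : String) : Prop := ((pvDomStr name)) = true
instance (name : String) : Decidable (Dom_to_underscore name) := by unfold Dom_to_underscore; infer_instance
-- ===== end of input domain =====

-- B replaces A's per-character if/else string accumulation by a translation table built
-- once (uppercase/digit ↦ "_"+lowercase) applied to name[1:] via str.translate, plus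
-- name[:1].lower(); equivalence is proved on all strings (the int branch is outside the
-- String-typed port).

-- ===== PORT A =====
def to_underscore (name : String) : String :=
  let cs := name.toList
  if cs.length < 2 then String.ofList (PySem.Chars.lower cs)   -- str(name).lower()
  else
    -- snake_case = name[0].lower(); then the for-loop over name[1:]
    let snake := [PySem.Chars.lowerChar (cs.headD ' ')]    -- cs is nonempty in this branch
    String.ofList (cs.tail.foldl (fun acc x =>
      if PySem.Chars.isupper x || PySem.Chars.isdigit x then
        acc ++ ['_', PySem.Chars.lowerChar x]
      else acc ++ [x]) snake)

-- ===== PORT B =====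
-- the dict comprehension _TABLE = {ord(c): "_" + c.lower() for c in "A..Z0..9"}
def pvTable : PySem.Dict Int (List Char) :=
  ("ABCDEFGHIJKLMNOPQRSTUVWXYZ0123456789".toList).foldl
    (fun d c => d.insert (c.toNat : Int) ['_', PySem.Chars.lowerChar c]) PySem.Dict.empty

-- name[:1].lower() + name[1:].translate(_TABLE); translate maps each char through the
-- table by its code point, keeping unmapped chars
def to_underscore_alt (name : String) : String :=
  let cs := name.toList
  String.ofList (PySem.Chars.lower (PySem.List.slice cs none (some 1))
    ++ (PySem.List.slice cs (some 1) none).flatMap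
         (fun c => pvTable.getD (c.toNat : Int) [c]))

-- ===== PRECONDITION & SPEC =====
def Spec_to_underscore (name : String) (out : String) : Prop := out = to_underscore_alt name
instance (name : String) (out : String) : Decidable (Spec_to_underscore name out) := by unfold Spec_to_underscore; infer_instance

-- ===== CLAIM (what is proved, stated in full; the proofs are below) =====
def Claim_equal_to_underscore : Prop := ∀ (name : String), Dom_to_underscore name → Spec_to_underscore name (to_underscore name)

-- ===== LEMMAS AND PROOFS =====

-- the table lookup computes exactly A's per-character if/else, for every Char
set_option maxRecDepth 8192 in
theorem pvTable_getD (c : Char) :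
    pvTable.getD (c.toNat : Int) [c] =
      (if PySem.Chars.isupper c || PySem.Chars.isdigit c then
        ['_', PySem.Chars.lowerChar c] else [c]) := by
  by_cases h : c.toNat < 128
  · have hc : c = Char.ofNat c.toNat := (Char.ofNat_toNat c).symm
    rw [hc]
    exact (by decide : ∀ n : Fin 128,
      pvTable.getD (((Char.ofNat n).toNat : Nat) : Int) [Char.ofNat n] =
        (if PySem.Chars.isupper (Char.ofNat n) || PySem.Chars.isdigit (Char.ofNat n) then
          ['_', PySem.Chars.lowerChar (Char.ofNat n)] else [Char.ofNat n])) ⟨c.toNat, h⟩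
  · -- code point ≥ 128: not uppercase, not a digit, and not a key of the table
    have hU : PySem.Chars.isupper c = false := by
      unfold Char.toNat at h
      simp only [PySem.Chars.isupper, Char.le_def, UInt32.le_iff_toNat_le,
        decide_eq_false_iff_not, Bool.and_eq_false_iff]
      right
      have hz : 'Z'.val.toNat = 90 := rfl
      rw [hz]; omega
    have hD : PySem.Chars.isdigit c = false := by
      unfold Char.toNat at h
      simp only [PySem.Chars.isdigit, Char.le_def, UInt32.le_iff_toNat_le,
        decide_eq_false_iff_not, Bool.and_eq_false_iff]
      right
      have hn : '9'.val.toNat = 57 := rfl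
      rw [hn]; omega
    rw [hU, hD]
    have hnc : pvTable.contains ((c.toNat : Int)) = false := by
      have h128 : (128 : Int) ≤ (c.toNat : Int) := by exact_mod_cast Nat.le_of_not_lt h
      clear h
      rw [show pvTable = PySem.Dict.mk [(65, ['_', 'a']), (66, ['_', 'b']), (67, ['_', 'c']), (68, ['_', 'd']), (69, ['_', 'e']), (70, ['_', 'f']), (71, ['_', 'g']), (72, ['_', 'h']), (73, ['_', 'i']), (74, ['_', 'j']), (75, ['_', 'k']), (76, ['_', 'l']), (77, ['_', 'm']), (78, ['_', 'n']), (79, ['_', 'o']), (80, ['_', 'p']), (81, ['_', 'q']), (82, ['_', 'r']), (83, ['_', 's']), (84, ['_', 't']), (85, ['_', 'u']), (86, ['_', 'v']), (87, ['_', 'w']), (88, ['_', 'x']), (89, ['_', 'y']), (90, ['_', 'z']), (48, ['_', '0']), (49, ['_', '1']), (50, ['_', '2']), (51, ['_', '3']), (52, ['_', '4']), (53, ['_', '5']), (54, ['_', '6']), (55, ['_', '7']), (56, ['_', '8']), (57, ['_', '9'])] from by decide,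
        PySem.Dict.contains_mk]
      simp only [List.any_cons, List.any_nil, Bool.or_eq_false_iff, beq_eq_false_iff_ne, ne_eq]
      and_intros <;> first | omega | trivial
    simp [PySem.Dict.getD_of_not_contains _ _ hnc]

-- A's loop, started from any accumulator, appends the pointwise translation of B
theorem pvLoop_eq (l : List Char) (acc : List Char) :
    l.foldl (fun acc x =>
      if PySem.Chars.isupper x || PySem.Chars.isdigit x then
        acc ++ ['_', PySem.Chars.lowerChar x]
      else acc ++ [x]) acc
    = acc ++ l.flatMap (fun c => pvTable.getD (c.toNat : Int) [c]) := by
  induction l generalizing acc with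
  | nil => simp
  | cons x xs ih =>
    simp only [List.foldl_cons, List.flatMap_cons, ih, pvTable_getD]
    by_cases h : (PySem.Chars.isupper x || PySem.Chars.isdigit x) = true <;> simp [h]

-- ===== VERDICT (by name: the statement is the Claim_ definition above) =====
theorem to_underscore_spec : Claim_equal_to_underscore := by
  intro name _
  show to_underscore name = to_underscore_alt name
  unfold to_underscore to_underscore_alt
  simp only []
  rw [PySem.List.slice_from_one, PySem.List.slice_to name.toList (by norm_num)]
  cases hcs : name.toList with
  | nil => simp
  | cons x xs =>
    cases xs with
    | nil => simp [PySem.Chars.lower]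
    | cons y ys =>
      rw [if_neg (by simp), show (x :: y :: ys).tail = y :: ys from rfl, pvLoop_eq]
      simp [PySem.Chars.lower]
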